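-- pv_equiv track=rewrite | github.com/paulingalls/divineruin | apps/agent/affect_analyzer.py | classify_interaction_mode
-- ===== SOURCE A (Python) =====
-- def classify_interaction_mode(signals: list[str]) -> str:
--     """Pick the dominant interaction mode from detected signals."""
--     priority = ["confused", "exploratory", "decisive", "social", "cautious"]
--     for mode in priority:
--         if mode in signals:
--             return mode
--     if "minimal" in signals:
--         return "passive"
--     return "exploratory"  # default when nothing matches
-- ===== SOURCE B (Python) =====
-- def classify_interaction_mode(signals: list[str]) -> str:
--     """Pick the dominant interaction mode from detected signals."""
--     priority = ["confused", "exploratory", "decisive", "social", "cautious"]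
--     rank = {mode: i for i, mode in enumerate(priority)}
--     best = None
--     for s in signals:
--         r = rank.get(s)
--         if r is not None and (best is None or r < best):
--             best = r
--     if best is not None:
--         return priority[best]
--     return "passive" if "minimal" in signals else "exploratory"
-- ===== Notes on version B (the rewrite author's own statement) =====
-- stated objective: alternative
-- what changed: Replaces the priority-list membership scan (each priority mode searched for in signals) by a precomputed rank table plus a single smallest-rank pass over signals, indexing the priority list once at the end.
import Mathlib
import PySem

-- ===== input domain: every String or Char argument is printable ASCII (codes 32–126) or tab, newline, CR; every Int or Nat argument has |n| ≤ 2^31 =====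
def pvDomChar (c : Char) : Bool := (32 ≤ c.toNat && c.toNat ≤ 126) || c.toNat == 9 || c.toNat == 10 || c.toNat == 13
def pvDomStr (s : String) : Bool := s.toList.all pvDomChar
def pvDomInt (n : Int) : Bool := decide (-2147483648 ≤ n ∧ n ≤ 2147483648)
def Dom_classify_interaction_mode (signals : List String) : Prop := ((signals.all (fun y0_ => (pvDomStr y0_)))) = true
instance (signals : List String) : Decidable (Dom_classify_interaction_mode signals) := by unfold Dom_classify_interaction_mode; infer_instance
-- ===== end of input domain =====

-- B replaces A's priority-list membership scan by a rank table and a single smallest-rank pass over the signals (alternative decomposition, same results).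


-- ===== PORT A =====
def pvPriority : List String := ["confused", "exploratory", "decisive", "social", "cautious"]

-- the 'for mode in priority: if mode in signals: return mode' loop
def pvALoop (priority : List String) (signals : List String) : Option String :=
  match priority with
  | [] => none
  | m :: rest => if signals.contains m then some m else pvALoop rest signals

def classify_interaction_mode (signals : List String) : String :=
  match pvALoop pvPriority signals with
  | some m => m
  | none => if signals.contains "minimal" then "passive" else "exploratory"

-- ===== PORT B =====
-- rank = {mode: i for i, mode in enumerate(priority)}
def pvRank : PySem.Dict String Int :=
  (PySem.List.enumerate pvPriority).foldl (fun d p => d.insert p.2 p.1) PySem.Dict.empty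

-- the 'for s in signals: …' arg-min loop over the input
def pvBLoop (signals : List String) (best : Option Int) : Option Int :=
  match signals with
  | [] => best
  | s :: rest =>
    match PySem.Dict.get? pvRank s with
    | none => pvBLoop rest best
    | some r =>
      match best with
      | none => pvBLoop rest (some r)
      | some b => if r < b then pvBLoop rest (some r) else pvBLoop rest best

def classify_interaction_mode_alt (signals : List String) : String :=
  match pvBLoop signals none with
  | some r => (PySem.List.pyGet? pvPriority r).getD ""   -- priority[best]; best is always in range here
  | none => if signals.contains "minimal" then "passive" else "exploratory"

-- ===== PRECONDITION & SPEC =====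
def Spec_classify_interaction_mode (signals : List String) (out : String) : Prop := out = classify_interaction_mode_alt signals
instance (signals : List String) (out : String) : Decidable (Spec_classify_interaction_mode signals out) := by unfold Spec_classify_interaction_mode; infer_instance

-- ===== CLAIM (what is proved, stated in full; the proofs are below) =====
def Claim_equal_classify_interaction_mode : Prop := ∀ (signals : List String), Dom_classify_interaction_mode signals → Spec_classify_interaction_mode signals (classify_interaction_mode signals)

-- ===== LEMMAS AND PROOFS =====

-- minimum on Option Int, none = +infinity (left-biased, matching pvBLoop's update)
def pvOMin (a b : Option Int) : Option Int :=
  match b with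
  | none => a
  | some bv =>
    match a with
    | none => some bv
    | some av => if bv < av then some bv else some av

-- smallest rank present in signals, as the first-present if-chain
def pvM (signals : List String) : Option Int :=
  if signals.contains "confused" then some 0
  else if signals.contains "exploratory" then some 1
  else if signals.contains "decisive" then some 2
  else if signals.contains "social" then some 3
  else if signals.contains "cautious" then some 4
  else none

set_option maxRecDepth 4000 in
lemma pvRank_get (s : String) : PySem.Dict.get? pvRank s =
    (if s = "confused" then some 0
     else if s = "exploratory" then some 1
     else if s = "decisive" then some 2
     else if s = "social" then some 3
     else if s = "cautious" then some (4 : Int)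
     else none) := by
  have : pvRank = PySem.Dict.mk [("confused", 0), ("exploratory", 1), ("decisive", 2), ("social", 3), ("cautious", 4)] := by decide
  rw [this]
  have base : (PySem.Dict.mk ([] : List (String × Int))).get? s = none := rfl
  rw [PySem.Dict.get?_mk_cons, PySem.Dict.get?_mk_cons, PySem.Dict.get?_mk_cons,
      PySem.Dict.get?_mk_cons, PySem.Dict.get?_mk_cons, base]
  simp only [beq_iff_eq]
  split_ifs <;> subst_vars <;> simp_all

lemma pvOMin_none_left (m : Option Int) : pvOMin none m = m := by
  rcases m <;> rfl

lemma pvOMin_none_right (m : Option Int) : pvOMin m none = m := rfl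

lemma pvOMin_some_some (x y : Int) : pvOMin (some x) (some y) = if y < x then some y else some x := rfl

lemma pvOMin_assoc (a b c : Option Int) : pvOMin (pvOMin a b) c = pvOMin a (pvOMin b c) := by
  rcases a with _ | av <;> rcases b with _ | bv <;> rcases c with _ | cv <;>
    simp only [pvOMin_none_left, pvOMin_none_right, pvOMin_some_some] <;>
    split_ifs <;>
    simp only [pvOMin_some_some] <;>
    split_ifs <;>
    first
    | rfl
    | (simp_all; omega)

lemma pvM_cons (s : String) (rest : List String) :
    pvM (s :: rest) = pvOMin (PySem.Dict.get? pvRank s) (pvM rest) := by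
  rw [pvRank_get]
  by_cases e1 : s = "confused" <;> by_cases e2 : s = "exploratory" <;>
  by_cases e3 : s = "decisive" <;> by_cases e4 : s = "social" <;>
  by_cases e5 : s = "cautious" <;>
    simp_all [pvM, pvOMin] <;>
    split_ifs <;> simp_all

lemma pvBLoop_eq (signals : List String) : ∀ b, pvBLoop signals b = pvOMin b (pvM signals) := by
  induction signals with
  | nil => intro b; simp [pvBLoop, pvM, pvOMin]
  | cons s rest ih =>
    intro b
    rw [pvM_cons, ← pvOMin_assoc, ← ih]
    simp only [pvBLoop]
    rcases h : PySem.Dict.get? pvRank s with _ | r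
    · simp [pvOMin]
    · rcases b with _ | bv
      · simp [pvOMin]
      · simp only [pvOMin]
        split_ifs <;> rfl

-- ===== VERDICT (by name: the statement is the Claim_ definition above) =====
theorem classify_interaction_mode_spec : Claim_equal_classify_interaction_mode := by
  intro signals _
  unfold Spec_classify_interaction_mode classify_interaction_mode classify_interaction_mode_alt
  rw [pvBLoop_eq]
  have hm : pvOMin none (pvM signals) = pvM signals := by
    rcases h : pvM signals <;> simp [pvOMin]
  rw [hm]
  unfold pvM pvALoop pvPriority
  by_cases c1 : signals.contains "confused" <;>
  by_cases c2 : signals.contains "exploratory" <;>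
  by_cases c3 : signals.contains "decisive" <;>
  by_cases c4 : signals.contains "social" <;>
  by_cases c5 : signals.contains "cautious" <;>
    simp_all [pvALoop, PySem.List.pyGet?, PySem.List.pyIdx?]
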